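-- pv_equiv track=rewrite | github.com/Jcarpenter-0/MLNet | agents/__init__.py | DefineSpanningActionSpace
-- ===== SOURCE A (Python) =====
-- def DefineSpanningActionSpace(actionFields:dict) -> list:
--     """Create a simple span of all possible combinations of a set of action fields.
--     Formatted as "actionParaname": range of inputs """
--     actionIndices = []
--
--     for actionFieldNum in range(0, len(actionFields)):
--         actionIndices.append(0)
--
--     # Get number of possible actions
--     numberOfPossibleActions = 1
--
--     for inputField in actionFields.keys():
--         inputFieldValues = actionFields[inputField]
--         numberOfPossibleActions = numberOfPossibleActions * len(inputFieldValues)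
--
--     # action para patterns
--     inputPatterns = []
--
--     # for all possible patterns of input paras
--     for currentActionParaPatternIndex in range(0, numberOfPossibleActions):
--
--         inputPatternDict = dict()
--
--
--         # For each input field, and range of inputs for that field
--         for index, actionField in enumerate(actionFields.keys()):
--             actionFieldInputRange = actionFields[actionField]
--             inputPlace = actionIndices[index]
--
--             inputPatternDict[actionField] = actionFieldInputRange[inputPlace]
--
--             # Increment to the next input parameter
--             inputPlace += 1
--
--             # check for wraparound, if so reset input place
--             if inputPlace >= len(actionFieldInputRange):
--
--                 actionIndices[index] = 0
--                 inputPlace = 0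
--
--             actionIndices[index] = inputPlace
--
--         inputPatterns.append(inputPatternDict)
--
--     return inputPatterns
-- ===== SOURCE B (Python) =====
-- def DefineSpanningActionSpace(actionFields: dict) -> list:
--     """Column-wise construction: each field's entire column over all n patterns is laid
--     out at once by list repetition (values * (n // len(values))), then written into the
--     patterns field by field; no per-pattern index arithmetic at all."""
--     n = 1
--     for values in actionFields.values():
--         n *= len(values)
--     if n == 0:
--         return []
--     patterns = [dict() for _ in range(n)]
--     for field, values in actionFields.items():
--         for pattern, v in zip(patterns, values * (n // len(values))):
--             pattern[field] = v
--     return patterns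
-- ===== Notes on version B (the rewrite author's own statement) =====
-- stated objective: alternative
-- what changed: A enumerates pattern-by-pattern while maintaining a per-field odometer index array with increment/wraparound each step; B builds the result column-by-column: it materialises each field's whole column over all n patterns at once by list repetition (values * (n // len(values))) and writes it into pre-allocated pattern dicts with zip, so no per-pattern index arithmetic exists at all.
import Mathlib
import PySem

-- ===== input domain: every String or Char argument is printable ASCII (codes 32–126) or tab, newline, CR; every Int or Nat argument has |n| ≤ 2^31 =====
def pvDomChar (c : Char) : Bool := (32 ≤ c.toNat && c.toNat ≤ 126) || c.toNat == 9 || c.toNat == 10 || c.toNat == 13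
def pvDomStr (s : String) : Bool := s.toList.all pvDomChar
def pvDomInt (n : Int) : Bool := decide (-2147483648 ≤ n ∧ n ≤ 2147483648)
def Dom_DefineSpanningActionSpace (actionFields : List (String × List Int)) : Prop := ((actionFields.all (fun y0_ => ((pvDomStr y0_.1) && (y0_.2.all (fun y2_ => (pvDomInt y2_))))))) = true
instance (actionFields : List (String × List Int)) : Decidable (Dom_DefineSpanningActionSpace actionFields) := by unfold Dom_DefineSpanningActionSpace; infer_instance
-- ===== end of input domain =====

-- B builds the result column-by-column (each field's whole column laid out by list
-- repetition, then zipped into the patterns) instead of A's pattern-by-pattern loop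
-- with a maintained odometer index array (alternative decomposition, same cost).

-- ===== PORT A =====
-- Literal port of A: the odometer array `actionIndices` is threaded through the outer
-- fold; the inner fold walks enumerate(keys) doing dict lookups and in-place index updates.
def DefineSpanningActionSpace (actionFields : List (String × List Int)) : List (List (String × Int)) :=
  let actionIndices : List Int :=
    (PySem.List.pyRange 0 (actionFields.length : Int) 1).foldl (fun acc _ => acc ++ [(0 : Int)]) []
  let numberOfPossibleActions : Int :=
    ((PySem.Dict.mk actionFields).keys).foldl
      (fun n inputField =>
        let inputFieldValues := ((PySem.Dict.mk actionFields).get? inputField).getD []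
        n * (inputFieldValues.length : Int)) 1
  let final :=
    (PySem.List.pyRange 0 numberOfPossibleActions 1).foldl
      (fun (st : List Int × List (List (String × Int))) _ =>
        let inner :=
          (PySem.List.enumerate ((PySem.Dict.mk actionFields).keys) 0).foldl
            (fun (st2 : List Int × PySem.Dict String Int) p =>
              let index := p.1
              let actionField := p.2
              let actionFieldInputRange := ((PySem.Dict.mk actionFields).get? actionField).getD []
              let inputPlace := PySem.List.pyGetD st2.1 index 0
              let d := st2.2.insert actionField (PySem.List.pyGetD actionFieldInputRange inputPlace 0)
              let inputPlace := inputPlace + 1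
              let wrapped :=
                if inputPlace ≥ (actionFieldInputRange.length : Int) then
                  (PySem.List.pySetD st2.1 index 0, (0 : Int))
                else (st2.1, inputPlace)
              (PySem.List.pySetD wrapped.1 index wrapped.2, d))
            (st.1, PySem.Dict.empty)
        (inner.1, st.2 ++ [inner.2.items]))
      (actionIndices, ([] : List (List (String × Int))))
  final.2

-- ===== PORT B =====
-- Port of Source B: n = product of lengths; early [] if n = 0; n empty dicts are
-- pre-allocated, then each field writes its whole column at once: the Python list
-- repetition 'values * (n // len(values))' is ported by hand as
-- (List.replicate (n // len).toNat values).flatten (exact: concatenation of that many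
-- copies), and 'for pattern, v in zip(patterns, column): pattern[field] = v' as a map
-- over the zip of patterns with the column.
def DefineSpanningActionSpace_alt (actionFields : List (String × List Int)) : List (List (String × Int)) :=
  let n : Int := actionFields.foldl (fun acc p => acc * (p.2.length : Int)) 1
  if n = 0 then []
  else
    let patterns : List (PySem.Dict String Int) :=
      (PySem.List.pyRange 0 n 1).map (fun _ => PySem.Dict.empty)
    let patterns := actionFields.foldl
      (fun (pats : List (PySem.Dict String Int)) p =>
        let column := (List.replicate (PySem.Int.floordiv n (p.2.length : Int)).toNat p.2).flatten
        (pats.zip column).map (fun q => q.1.insert p.1 q.2))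
      patterns
    patterns.map (fun d => d.items)

-- ===== PRECONDITION & SPEC =====
-- Pre_ only rules out association lists with duplicate keys, which do not represent any
-- Python dict input (A's parameter is a dict, whose keys are necessarily distinct).
def Pre_DefineSpanningActionSpace (actionFields : List (String × List Int)) : Prop :=
  (actionFields.map Prod.fst).Nodup
instance (actionFields : List (String × List Int)) : Decidable (Pre_DefineSpanningActionSpace actionFields) := by unfold Pre_DefineSpanningActionSpace; infer_instance
def pvWitness_DefineSpanningActionSpace : (List (String × List Int)) :=
  [("a", [1, 2]), ("b", [10, 20, 30])]

def Spec_DefineSpanningActionSpace (actionFields : List (String × List Int)) (out : List (List (String × Int))) : Prop := out = DefineSpanningActionSpace_alt actionFields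
instance (actionFields : List (String × List Int)) (out : List (List (String × Int))) : Decidable (Spec_DefineSpanningActionSpace actionFields out) := by unfold Spec_DefineSpanningActionSpace; infer_instance

-- ===== CLAIM (what is proved, stated in full; the proofs are below) =====
def Claim_equal_DefineSpanningActionSpace : Prop := ∀ (actionFields : List (String × List Int)), Dom_DefineSpanningActionSpace actionFields → Pre_DefineSpanningActionSpace actionFields → Spec_DefineSpanningActionSpace actionFields (DefineSpanningActionSpace actionFields)

-- ===== LEMMAS AND PROOFS =====

-- current index / value / pattern at outer-iteration k, and the fold bodies of the ports
def pvIdx (k : Int) (p : String × List Int) : Int := PySem.Int.mod k (p.2.length : Int)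

def pvVal (k : Int) (p : String × List Int) : Int := PySem.List.pyGetD p.2 (pvIdx k p) 0

def pvPat (L : List (String × List Int)) (k : Int) : List (String × Int) :=
  L.map (fun p => (p.1, pvVal k p))

def pvStepA (L : List (String × List Int)) (st2 : List Int × PySem.Dict String Int)
    (p : Int × String) : List Int × PySem.Dict String Int :=
  let index := p.1
  let actionField := p.2
  let actionFieldInputRange := ((PySem.Dict.mk L).get? actionField).getD []
  let inputPlace := PySem.List.pyGetD st2.1 index 0
  let d := st2.2.insert actionField (PySem.List.pyGetD actionFieldInputRange inputPlace 0)
  let inputPlace := inputPlace + 1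
  let wrapped :=
    if inputPlace ≥ (actionFieldInputRange.length : Int) then
      (PySem.List.pySetD st2.1 index 0, (0 : Int))
    else (st2.1, inputPlace)
  (PySem.List.pySetD wrapped.1 index wrapped.2, d)

def pvOutA (L : List (String × List Int)) (st : List Int × List (List (String × Int)))
    (_ : Int) : List Int × List (List (String × Int)) :=
  let inner :=
    (PySem.List.enumerate ((PySem.Dict.mk L).keys) 0).foldl (pvStepA L) (st.1, PySem.Dict.empty)
  (inner.1, st.2 ++ [inner.2.items])

def pvNA (L : List (String × List Int)) : Int :=
  ((PySem.Dict.mk L).keys).foldl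
    (fun n inputField => n * ((((PySem.Dict.mk L).get? inputField).getD []).length : Int)) 1

def pvN (L : List (String × List Int)) : Int :=
  L.foldl (fun acc p => acc * (p.2.length : Int)) 1

def pvStepB (n : Int) (pats : List (PySem.Dict String Int)) (p : String × List Int) :
    List (PySem.Dict String Int) :=
  let column := (List.replicate (PySem.Int.floordiv n (p.2.length : Int)).toNat p.2).flatten
  (pats.zip column).map (fun q => q.1.insert p.1 q.2)

lemma pvPortA_eq (L : List (String × List Int)) :
    DefineSpanningActionSpace L =
      ((PySem.List.pyRange 0 (pvNA L) 1).foldl (pvOutA L)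
        ((PySem.List.pyRange 0 (L.length : Int) 1).foldl (fun acc _ => acc ++ [(0 : Int)]) [],
         ([] : List (List (String × Int))))).2 := rfl

lemma pvPortB_eq (L : List (String × List Int)) :
    DefineSpanningActionSpace_alt L =
      if pvN L = 0 then []
      else
        (L.foldl (pvStepB (pvN L))
          ((PySem.List.pyRange 0 (pvN L) 1).map (fun _ => PySem.Dict.empty))).map
          (fun d => d.items) := rfl

lemma pvKeys_mk (L : List (String × List Int)) :
    (PySem.Dict.mk L).keys = L.map Prod.fst := rfl

lemma pvItems_mk (L : List (String × List Int)) : (PySem.Dict.mk L).items = L := rfl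

lemma pvGet_mk (L : List (String × List Int)) (hnd : (L.map Prod.fst).Nodup)
    {p : String × List Int} (hp : p ∈ L) : (PySem.Dict.mk L).get? p.1 = some p.2 := by
  apply PySem.Dict.get?_of_mem_items
  · rw [pvItems_mk]; exact hp
  · rw [pvKeys_mk]; exact hnd

lemma pvNA_eq (L : List (String × List Int)) (hnd : (L.map Prod.fst).Nodup) :
    pvNA L = pvN L := by
  unfold pvNA pvN
  rw [pvKeys_mk, List.foldl_map]
  apply PySem.List.foldl_congr_mem
  intro acc p hp
  rw [pvGet_mk L hnd hp]
  rfl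

lemma pvN_cast (L : List (String × List Int)) : ∀ (init : Nat),
    L.foldl (fun acc p => acc * (p.2.length : Int)) (init : Int) =
      ((L.foldl (fun acc p => acc * p.2.length) init : Nat) : Int) := by
  induction L with
  | nil => intro init; rfl
  | cons q L ih =>
      intro init
      simp only [List.foldl_cons]
      rw [show ((init : Int) * (q.2.length : Int)) = ((init * q.2.length : Nat) : Int) by push_cast; ring]
      exact ih _

lemma pvN_eq_prod (L : List (String × List Int)) :
    pvN L = (((L.map (fun p => p.2.length)).prod : Nat) : Int) := by
  unfold pvN
  rw [show (1 : Int) = ((1 : Nat) : Int) by norm_num, pvN_cast]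
  congr 1
  rw [List.prod_eq_foldl, List.foldl_map]

lemma pvN_zero (L : List (String × List Int)) (h : ¬ ∀ p ∈ L, 0 < p.2.length) :
    pvN L = 0 := by
  rw [not_forall] at h
  obtain ⟨p, hp⟩ := h
  obtain ⟨hpL, hlen'⟩ := Classical.not_imp.1 hp
  have hlen0 : p.2.length = 0 := by omega
  clear hlen'
  rw [pvN_eq_prod]
  have hz : (L.map (fun p => p.2.length)).prod = 0 :=
    List.prod_eq_zero (by rw [← hlen0]; exact List.mem_map_of_mem hpL)
  rw [hz]; rfl

lemma pvN_pos (L : List (String × List Int)) (h : ∀ p ∈ L, 0 < p.2.length) :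
    0 < pvN L := by
  rw [pvN_eq_prod]
  have : 0 < (L.map (fun p => p.2.length)).prod := by
    apply List.prod_pos
    intro x hx
    obtain ⟨p, hp, rfl⟩ := List.mem_map.1 hx
    exact h p hp
  exact_mod_cast this

lemma pvLen_dvd (L : List (String × List Int)) {p : String × List Int} (hp : p ∈ L) :
    p.2.length ∣ (L.map (fun p => p.2.length)).prod :=
  List.dvd_prod (List.mem_map_of_mem hp)

-- mod arithmetic behind the odometer increment
lemma pvMod_succ (k len : Int) (hl : 0 < len) :
    PySem.Int.mod (k + 1) len =
      if PySem.Int.mod k len + 1 ≥ len then 0 else PySem.Int.mod k len + 1 := by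
  rw [PySem.Int.mod_eq_emod_of_pos hl, PySem.Int.mod_eq_emod_of_pos hl]
  have h1 : 0 ≤ k % len := Int.emod_nonneg _ (by omega)
  have h2 : k % len < len := Int.emod_lt_of_pos _ hl
  have hstep : (k + 1) % len = (k % len + 1) % len := by
    have hk' : k + 1 = (k % len + 1) + len * (k / len) := by
      have h := Int.emod_add_mul_ediv k len; linarith
    rw [hk', Int.add_mul_emod_self_left]
  rw [hstep]
  split_ifs with h
  · rw [show k % len + 1 = len by omega, Int.emod_self]
  · exact Int.emod_eq_of_lt (by omega) (by omega)

lemma pvSet_append_length {α : Type} (as : List α) (b : α) (bs : List α) (v : α) :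
    (as ++ b :: bs).set as.length v = as ++ v :: bs := by
  induction as with
  | nil => rfl
  | cons a as ih => simp [ih]

lemma pvGetD_append_length {α : Type} (as : List α) (b : α) (bs : List α) (d : α) :
    (as ++ b :: bs).getD as.length d = b := by
  induction as with
  | nil => rfl
  | cons a as ih => simp only [List.cons_append]; exact ih

lemma pvInnerA (L : List (String × List Int)) (hnd : (L.map Prod.fst).Nodup)
    (k : Int) (hpos : ∀ p ∈ L, 0 < p.2.length) :
    ∀ (tail pre : List (String × List Int)), pre ++ tail = L → ∀ (d : PySem.Dict String Int),
    (PySem.List.enumerate (tail.map Prod.fst) (pre.length : Int)).foldl (pvStepA L)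
      (pre.map (pvIdx (k + 1)) ++ tail.map (pvIdx k), d)
    = (L.map (pvIdx (k + 1)), tail.foldl (fun d p => d.insert p.1 (pvVal k p)) d) := by
  intro tail
  induction tail with
  | nil =>
      intro pre hpt d
      subst hpt
      simp [PySem.List.enumerate_nil]
  | cons q tail ih =>
      intro pre hpt d
      have hqL : q ∈ L := by rw [← hpt]; exact List.mem_append.2 (Or.inr (List.mem_cons_self))
      have hlen : 0 < q.2.length := hpos q hqL
      have hget : (PySem.Dict.mk L).get? q.1 = some q.2 := pvGet_mk L hnd hqL
      simp only [List.map_cons, PySem.List.enumerate_cons, List.foldl_cons]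
      have hstepval :
          pvStepA L (pre.map (pvIdx (k + 1)) ++ pvIdx k q :: tail.map (pvIdx k), d)
              ((pre.length : Int), q.1)
            = (pre.map (pvIdx (k + 1)) ++ pvIdx (k + 1) q :: tail.map (pvIdx k),
               d.insert q.1 (pvVal k q)) := by
        simp only [pvStepA, hget, Option.getD_some]
        have hplace :
            PySem.List.pyGetD
                (pre.map (pvIdx (k + 1)) ++ pvIdx k q :: tail.map (pvIdx k))
                ((pre.length : Int)) 0 = pvIdx k q := by
          rw [PySem.List.pyGetD_natCast,
            show pre.length = (pre.map (pvIdx (k + 1))).length by simp,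
            pvGetD_append_length]
        rw [hplace]
        have hidx := pvMod_succ k (q.2.length : Int) (by exact_mod_cast hlen)
        by_cases hw : pvIdx k q + 1 ≥ ((q.2.length : Nat) : Int)
        · rw [if_pos hw]
          simp only [PySem.List.pySetD_natCast, List.set_set]
          rw [show pre.length = (pre.map (pvIdx (k + 1))).length from (by simp),
            pvSet_append_length]
          have h0 : pvIdx (k + 1) q = 0 := by
            unfold pvIdx at hw ⊢; rw [hidx, if_pos hw]
          rw [h0]; rfl
        · rw [if_neg hw]
          simp only [PySem.List.pySetD_natCast]
          rw [show pre.length = (pre.map (pvIdx (k + 1))).length from (by simp),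
            pvSet_append_length]
          have h0 : pvIdx (k + 1) q = pvIdx k q + 1 := by
            unfold pvIdx at hw ⊢; rw [hidx, if_neg hw]
          rw [h0]; rfl
      rw [hstepval]
      have hpt' : (pre ++ [q]) ++ tail = L := by simpa using hpt
      have hcast : (pre.length : Int) + 1 = (((pre ++ [q]).length : Nat) : Int) := by
        push_cast [List.length_append]; simp
      rw [hcast]
      have h2 : pre.map (pvIdx (k + 1)) ++ pvIdx (k + 1) q :: tail.map (pvIdx k)
          = (pre ++ [q]).map (pvIdx (k + 1)) ++ tail.map (pvIdx k) := by
        simp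
      rw [h2]
      exact ih (pre ++ [q]) hpt' (d.insert q.1 (pvVal k q))

lemma pvItems_fold (L : List (String × List Int)) (hnd : (L.map Prod.fst).Nodup) (k : Int) :
    (L.foldl (fun (d : PySem.Dict String Int) p => d.insert p.1 (pvVal k p))
      PySem.Dict.empty).items = pvPat L k := by
  have h := PySem.Dict.items_foldl_insert_fresh (κ := String) (ν := Int) L
    (fun p => p.1) (fun p => pvVal k p) PySem.Dict.empty
    (fun a _ => PySem.Dict.contains_empty _) (by simpa using hnd)
  simpa [pvPat] using h

lemma pvOuterA_lem (L : List (String × List Int)) (hnd : (L.map Prod.fst).Nodup)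
    (hpos : ∀ p ∈ L, 0 < p.2.length) : ∀ (n : Nat),
    (PySem.List.pyRange 0 (n : Int) 1).foldl (pvOutA L)
      (L.map (pvIdx 0), ([] : List (List (String × Int))))
    = (L.map (pvIdx (n : Int)), (PySem.List.pyRange 0 (n : Int) 1).map (pvPat L)) := by
  intro n
  induction n with
  | zero => simp [PySem.List.pyRange_one_eq_nil le_rfl]
  | succ n ih =>
      have h0n : (0 : Int) ≤ (n : Int) := by positivity
      rw [show (((n + 1 : Nat)) : Int) = (n : Int) + 1 by push_cast; ring]
      rw [PySem.List.pyRange_one_succ_right h0n, List.foldl_append, List.map_append, ih]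
      simp only [List.foldl_cons, List.foldl_nil]
      unfold pvOutA
      rw [pvKeys_mk]
      have hin := pvInnerA L hnd (n : Int) hpos L [] rfl PySem.Dict.empty
      simp only [List.length_nil, Nat.cast_zero, List.map_nil, List.nil_append] at hin
      rw [hin]
      simp [pvItems_fold L hnd (n : Int)]

-- the repeated column lists exactly the cyclic values vs[i % len] for i in range(k*len)
lemma pvColumn_repeat (vs : List Int) (hlen : 0 < vs.length) : ∀ (k : Nat),
    (List.replicate k vs).flatten =
      (PySem.List.pyRange 0 ((k * vs.length : Nat) : Int) 1).map
        (fun i => PySem.List.pyGetD vs (PySem.Int.mod i (vs.length : Int)) 0) := by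
  intro k
  induction k with
  | zero => simp [PySem.List.pyRange_one_eq_nil le_rfl]
  | succ k ih =>
      have hsplit : PySem.List.pyRange 0 (((k + 1) * vs.length : Nat) : Int) 1
          = PySem.List.pyRange 0 (vs.length : Int) 1 ++
            PySem.List.pyRange (vs.length : Int) (((k + 1) * vs.length : Nat) : Int) 1 := by
        apply PySem.List.pyRange_one_append
        · exact_mod_cast Nat.zero_le _
        · exact_mod_cast Nat.le_mul_of_pos_left vs.length (Nat.succ_pos k)
      rw [show List.replicate (k + 1) vs = vs :: List.replicate k vs from rfl,
        List.flatten_cons, hsplit, List.map_append]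
      congr 1
      · -- first block: indices 0 ≤ i < len, mod i len = i, then the map is vs itself
        have h1 : (PySem.List.pyRange 0 (vs.length : Int) 1).map
            (fun i => PySem.List.pyGetD vs (PySem.Int.mod i (vs.length : Int)) 0)
            = (PySem.List.pyRange 0 (vs.length : Int) 1).map
            (fun i => PySem.List.pyGetD vs i 0) := by
          apply List.map_congr_left
          intro i hi
          obtain ⟨hi0, hi1⟩ := (PySem.List.mem_pyRange_one).1 hi
          rw [PySem.Int.mod_eq_emod_of_pos (by exact_mod_cast hlen),
            Int.emod_eq_of_lt hi0 hi1]
        rw [h1]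
        exact (PySem.List.map_pyGetD_pyRange_zero' vs 0).symm
      · -- second block: shift by len, mod (len + j) len = mod j len
        rw [ih]
        rw [PySem.List.pyRange_one, PySem.List.pyRange_one]
        have hlc : ((((k + 1) * vs.length : Nat) : Int) - (vs.length : Int)).toNat
            = (k * vs.length : Nat) := by
          rw [Nat.succ_mul]; push_cast; omega
        have hlc2 : (((k * vs.length : Nat) : Int) - 0).toNat = (k * vs.length : Nat) := by
          omega
        rw [hlc, hlc2, List.map_map, List.map_map]
        apply List.map_congr_left
        intro j _
        simp only [Function.comp]
        congr 1
        have hl0 : (0 : Int) < (vs.length : Int) := by exact_mod_cast hlen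
        rw [PySem.Int.mod_eq_emod_of_pos hl0, PySem.Int.mod_eq_emod_of_pos hl0]
        rw [show ((vs.length : Int) + (j : Int)) = ((j : Int) + (vs.length : Int) * 1) by ring,
          Int.add_mul_emod_self_left]
        norm_num

-- B's column for a field whose length divides n is exactly the cyclic column of pvVal
lemma pvColumn_eq (nN : Nat) (p : String × List Int) (hlen : 0 < p.2.length)
    (hdvd : p.2.length ∣ nN) :
    (List.replicate (PySem.Int.floordiv (nN : Int) (p.2.length : Int)).toNat p.2).flatten
      = (PySem.List.pyRange 0 (nN : Int) 1).map (fun i => pvVal i p) := by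
  have hfd : PySem.Int.floordiv (nN : Int) (p.2.length : Int)
      = ((nN / p.2.length : Nat) : Int) := PySem.Int.floordiv_natCast nN p.2.length
  rw [hfd, Int.toNat_natCast]
  have hk : (nN / p.2.length) * p.2.length = nN := Nat.div_mul_cancel hdvd
  have := pvColumn_repeat p.2 hlen (nN / p.2.length)
  rw [hk] at this
  exact this

-- fold invariant for B: writing columns over pre-allocated per-index dicts
lemma pvFoldB_lem (nN : Nat) : ∀ (tail : List (String × List Int)),
    (∀ p ∈ tail, 0 < p.2.length ∧ p.2.length ∣ nN) →
    ∀ (f : Int → PySem.Dict String Int),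
    tail.foldl (pvStepB (nN : Int)) ((PySem.List.pyRange 0 (nN : Int) 1).map f)
      = (PySem.List.pyRange 0 (nN : Int) 1).map
          (fun i => tail.foldl (fun d p => d.insert p.1 (pvVal i p)) (f i)) := by
  intro tail
  induction tail with
  | nil => intro _ f; simp
  | cons q tail ih =>
      intro h f
      obtain ⟨hq, htail⟩ := List.forall_mem_cons.1 h
      simp only [List.foldl_cons]
      have hstep : pvStepB (nN : Int) ((PySem.List.pyRange 0 (nN : Int) 1).map f) q
          = (PySem.List.pyRange 0 (nN : Int) 1).map
              (fun i => (f i).insert q.1 (pvVal i q)) := by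
        unfold pvStepB
        rw [pvColumn_eq nN q hq.1 hq.2]
        simp only [List.zip_map', List.map_map]
        rfl
      rw [hstep]
      exact ih htail (fun i => (f i).insert q.1 (pvVal i q))

-- ===== VERDICT (by name: the statement is the Claim_ definition above) =====
theorem DefineSpanningActionSpace_spec : Claim_equal_DefineSpanningActionSpace := by
  intro L _dom hnd
  unfold Spec_DefineSpanningActionSpace
  rw [pvPortA_eq, pvPortB_eq, pvNA_eq L hnd]
  by_cases hall : ∀ p ∈ L, 0 < p.2.length
  · have hpos := pvN_pos L hall
    rw [if_neg (by omega)]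
    have hinit : (PySem.List.pyRange 0 (L.length : Int) 1).foldl
        (fun acc _ => acc ++ [(0 : Int)]) [] = L.map (pvIdx 0) := by
      rw [PySem.List.foldl_append_singleton_eq_map (fun _ => (0 : Int))]
      rw [List.nil_append]
      have hlen : (PySem.List.pyRange 0 (L.length : Int) 1).length = L.length := by
        rw [PySem.List.length_pyRange_one]; simp
      rw [List.map_const', hlen]
      symm
      rw [List.eq_replicate_iff]
      refine ⟨by simp, ?_⟩
      intro b hb
      obtain ⟨p, hp, rfl⟩ := List.mem_map.1 hb
      have := hall p hp
      unfold pvIdx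
      rw [PySem.Int.mod_eq_emod_of_pos (by exact_mod_cast this)]
      simp
    rw [hinit]
    have hN : 0 ≤ pvN L := le_of_lt hpos
    have hNnat : pvN L = (((pvN L).toNat : Nat) : Int) := (Int.toNat_of_nonneg hN).symm
    rw [hNnat, pvOuterA_lem L hnd hall ((pvN L).toNat)]
    have hdvd : ∀ p ∈ L, 0 < p.2.length ∧ p.2.length ∣ (pvN L).toNat := by
      intro p hp
      refine ⟨hall p hp, ?_⟩
      have h1 := pvLen_dvd L hp
      have h2 : (pvN L).toNat = (L.map (fun p => p.2.length)).prod := by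
        rw [pvN_eq_prod, Int.toNat_natCast]
      rw [h2]; exact h1
    rw [pvFoldB_lem ((pvN L).toNat) L hdvd (fun _ => PySem.Dict.empty)]
    rw [List.map_map]
    apply List.map_congr_left
    intro i _
    simp only [Function.comp]
    exact (pvItems_fold L hnd i).symm
  · have h0 : pvN L = 0 := pvN_zero L hall
    rw [h0, if_pos rfl]
    simp [PySem.List.pyRange_one_eq_nil le_rfl]
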